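-- pv_equiv track=rewrite | github.com/frickly-systems/ardep_fork | copy-righter/cmake.py | _dedupe_comment_spacers
-- ===== SOURCE A (Python) =====
-- def _dedupe_comment_spacers(
--     lines: list[str], license_idx: int
-- ) -> tuple[int, bool]:
--     changed = False
--     while license_idx > 1 and lines[license_idx - 2].strip() == "#":
--         del lines[license_idx - 2]
--         license_idx -= 1
--         changed = True
--     return license_idx, changed
-- ===== SOURCE B (Python) =====
-- def _dedupe_comment_spacers(
--     lines: list[str], license_idx: int
-- ) -> tuple[int, bool]:
--     # Count the run of consecutive spacer lines just above the license line,
--     # then remove the whole run with one slice deletion.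
--     count = 0
--     while license_idx - 2 - count >= 0 and lines[license_idx - 2 - count].strip() == "#":
--         count += 1
--     del lines[license_idx - 1 - count : license_idx - 1]
--     return license_idx - count, count > 0
-- ===== Notes on version B (the rewrite author's own statement) =====
-- stated objective: alternative
-- what changed: Replaces the interleaved check-and-delete-one loop with a pure backward counting pass over the untouched list followed by a single bulk slice deletion; the result is computed arithmetically from the count.
import Mathlib
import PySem

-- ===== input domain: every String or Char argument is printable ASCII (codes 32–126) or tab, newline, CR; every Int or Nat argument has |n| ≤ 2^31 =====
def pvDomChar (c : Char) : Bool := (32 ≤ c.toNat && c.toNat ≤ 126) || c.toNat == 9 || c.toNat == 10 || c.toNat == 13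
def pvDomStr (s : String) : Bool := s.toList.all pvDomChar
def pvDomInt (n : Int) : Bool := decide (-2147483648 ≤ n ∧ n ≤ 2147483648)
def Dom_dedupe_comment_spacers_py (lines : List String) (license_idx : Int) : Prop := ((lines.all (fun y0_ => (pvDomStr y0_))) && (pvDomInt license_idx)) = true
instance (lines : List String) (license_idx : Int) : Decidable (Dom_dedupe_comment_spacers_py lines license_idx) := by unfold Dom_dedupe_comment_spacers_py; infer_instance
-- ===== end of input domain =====

-- B replaces A's interleaved check-then-delete-one loop by one backward counting
-- pass plus a single bulk slice deletion (objective: alternative decomposition).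
-- Both A and B mutate `lines` identically in Python; the equivalence proved here
-- is about the RETURN value.

-- ===== PORT A =====
-- while license_idx > 1 and lines[license_idx-2].strip() == "#": del lines[...]; ...
def dedupeLoopA (lines : List String) (li : Int) (changed : Bool) : Int × Bool :=
  if _h : li > 1 then
    match PySem.List.pop? lines (li - 2) with
    | none => (li, changed)         -- IndexError on lines[li-2]; excluded by Pre_
    | some (s, rest) =>
      if PySem.Str.strip s = "#" then
        dedupeLoopA rest (li - 1) true
      else (li, changed)
  else (li, changed)
termination_by li.toNat
decreasing_by omega

def dedupe_comment_spacers_py (lines : List String) (license_idx : Int) : Int × Bool :=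
  dedupeLoopA lines license_idx false

-- ===== PORT B =====
-- while license_idx - 2 - count >= 0 and lines[license_idx-2-count].strip() == "#": count += 1
-- (idx = license_idx - 2 - count decreases by 1 each step)
def countSpacersB (lines : List String) (idx : Int) : Nat :=
  if _h : idx ≥ 0 then
    match PySem.List.pyGet? lines idx with
    | none => 0                     -- IndexError; excluded by Pre_
    | some s =>
      if PySem.Str.strip s = "#" then countSpacersB lines (idx - 1) + 1 else 0
  else 0
termination_by (idx + 1).toNat
decreasing_by omega

def dedupe_comment_spacers_py_alt (lines : List String) (license_idx : Int) : Int × Bool :=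
  let count := countSpacersB lines (license_idx - 2)
  -- `del lines[license_idx-1-count : license_idx-1]` mutates the argument only;
  -- the returned value does not depend on it.
  (license_idx - count, count ≠ 0)

-- ===== PRECONDITION & SPEC =====
-- Pre_ excludes exactly the inputs on which the first access lines[license_idx-2]
-- raises IndexError in Python (both A and B raise there).
def Pre_dedupe_comment_spacers_py (lines : List String) (license_idx : Int) : Prop :=
  license_idx > 1 → license_idx ≤ (lines.length : Int) + 1
instance (lines : List String) (license_idx : Int) : Decidable (Pre_dedupe_comment_spacers_py lines license_idx) := by unfold Pre_dedupe_comment_spacers_py; infer_instance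

def pvWitness_dedupe_comment_spacers_py : List String × Int := (["# a", " # ", "#", "# License"], 3)

def Spec_dedupe_comment_spacers_py (lines : List String) (license_idx : Int) (out : Int × Bool) : Prop := out = dedupe_comment_spacers_py_alt lines license_idx
instance (lines : List String) (license_idx : Int) (out : Int × Bool) : Decidable (Spec_dedupe_comment_spacers_py lines license_idx out) := by unfold Spec_dedupe_comment_spacers_py; infer_instance

-- ===== CLAIM (what is proved, stated in full; the proofs are below) =====
def Claim_equal_dedupe_comment_spacers_py : Prop := ∀ (lines : List String) (license_idx : Int), Dom_dedupe_comment_spacers_py lines license_idx → Pre_dedupe_comment_spacers_py lines license_idx → Spec_dedupe_comment_spacers_py lines license_idx (dedupe_comment_spacers_py lines license_idx)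

-- ===== LEMMAS AND PROOFS =====

-- Deleting the element at position p does not change the count taken from an index below p.
lemma countSpacersB_eraseIdx (lines : List String) (p : Nat) :
    ∀ (n : Nat) (idx : Int), (idx + 1).toNat ≤ n → idx < (p : Int) →
      countSpacersB (lines.eraseIdx p) idx = countSpacersB lines idx := by
  intro n
  induction n with
  | zero =>
    intro idx hn _
    have h0 : ¬ idx ≥ 0 := by omega
    conv_lhs => rw [countSpacersB]
    conv_rhs => rw [countSpacersB]
    simp [h0]
  | succ n ih =>
    intro idx hn hlt
    by_cases h0 : idx ≥ 0
    · have hget : PySem.List.pyGet? (lines.eraseIdx p) idx = PySem.List.pyGet? lines idx := by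
        rw [PySem.List.pyGet?_of_nonneg (lines.eraseIdx p) h0,
            PySem.List.pyGet?_of_nonneg lines h0]
        exact List.getElem?_eraseIdx_of_lt (by omega)
      conv_lhs => rw [countSpacersB]
      conv_rhs => rw [countSpacersB]
      rw [hget]
      cases hg : PySem.List.pyGet? lines idx with
      | none => simp [h0]
      | some s =>
        by_cases hs : PySem.Str.strip s = "#"
        · simp [h0, hs, ih (idx - 1) (by omega) (by omega)]
        · simp [h0, hs]
    · conv_lhs => rw [countSpacersB]
      conv_rhs => rw [countSpacersB]
      simp [h0]

-- A's interleaved loop equals li minus the backward spacer count,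
-- with changed set iff the count is nonzero.
lemma dedupeLoopA_eq :
    ∀ (n : Nat) (li : Int) (lines : List String) (changed : Bool), li.toNat ≤ n →
      (li > 1 → li ≤ (lines.length : Int) + 1) →
      dedupeLoopA lines li changed =
        (li - countSpacersB lines (li - 2),
         changed || decide (countSpacersB lines (li - 2) ≠ 0)) := by
  intro n
  induction n with
  | zero =>
    intro li lines changed hn _
    have h1 : ¬ li > 1 := by omega
    have h2 : ¬ (2 : Int) ≤ li := by omega
    rw [dedupeLoopA]
    conv_rhs => rw [countSpacersB]
    simp [h1, h2]
  | succ n ih =>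
    intro li lines changed hn hpre
    by_cases h1 : li > 1
    · have h0 : (li - 2) ≥ 0 := by omega
      have hplt : (li - 2).toNat < lines.length := by
        have := hpre h1; omega
      have hget : PySem.List.pyGet? lines (li - 2) = some (lines[(li - 2).toNat]) :=
        PySem.List.pyGet?_eq_some_getElem lines h0 (by omega)
      have hcast : li - 2 = (((li - 2).toNat : Nat) : Int) := by omega
      have hpop := PySem.List.pop?_natCast lines ((li - 2).toNat) hplt
      rw [← hcast] at hpop
      rw [dedupeLoopA]
      conv_rhs => rw [countSpacersB]
      simp only [h1, dite_true, h0, hget, hpop]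
      by_cases hs : PySem.Str.strip (lines[(li - 2).toNat]) = "#"
      · simp only [hs, if_true]
        have hlen : (lines.eraseIdx (li - 2).toNat).length = lines.length - 1 :=
          List.length_eraseIdx_of_lt hplt
        rw [ih (li - 1) (lines.eraseIdx (li - 2).toNat) true (by omega)
              (by intro h; rw [hlen]; omega)]
        have hcnt : countSpacersB (lines.eraseIdx (li - 2).toNat) (li - 1 - 2)
            = countSpacersB lines (li - 1 - 2) :=
          countSpacersB_eraseIdx lines _ n (li - 1 - 2) (by omega) (by omega)
        rw [hcnt]
        have harg : li - 1 - 2 = (li - 2) - 1 := by omega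
        rw [harg]
        simp only [Prod.mk.injEq]
        constructor
        · push_cast; ring
        · simp
      · simp [hs]
    · have h1' : ¬ (2 : Int) ≤ li := by omega
      rw [dedupeLoopA]
      conv_rhs => rw [countSpacersB]
      simp [h1, h1']

-- ===== VERDICT (by name: the statement is the Claim_ definition above) =====
theorem dedupe_comment_spacers_py_spec : Claim_equal_dedupe_comment_spacers_py := by
  intro lines li _ hpre
  unfold Spec_dedupe_comment_spacers_py dedupe_comment_spacers_py dedupe_comment_spacers_py_alt
  rw [dedupeLoopA_eq li.toNat li lines false le_rfl hpre]
  simp
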